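-- pv_equiv track=rewrite | github.com/collindaley/advent-of-code-2023 | day04/src/utils.py | check_winners
-- ===== SOURCE A (Python) =====
-- def check_winners(key, nums):
--     double = 0
--     for num in nums:
--         if num in key:
--             if double == 0:
--                 double = 1
--             else:
--                 double *= 2
--     return double
-- ===== SOURCE B (Python) =====
-- def check_winners(key, nums):
--     count = sum(1 for num in nums if num in key)
--     return 2 ** (count - 1) if count else 0
-- ===== Notes on version B (the rewrite author's own statement) =====
-- stated objective: simpler
-- what changed: B counts the matches in one pass and returns the closed form 2**(count-1) (0 when count is 0), replacing A's running doubling accumulator with its first-match special case.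
import Mathlib
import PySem

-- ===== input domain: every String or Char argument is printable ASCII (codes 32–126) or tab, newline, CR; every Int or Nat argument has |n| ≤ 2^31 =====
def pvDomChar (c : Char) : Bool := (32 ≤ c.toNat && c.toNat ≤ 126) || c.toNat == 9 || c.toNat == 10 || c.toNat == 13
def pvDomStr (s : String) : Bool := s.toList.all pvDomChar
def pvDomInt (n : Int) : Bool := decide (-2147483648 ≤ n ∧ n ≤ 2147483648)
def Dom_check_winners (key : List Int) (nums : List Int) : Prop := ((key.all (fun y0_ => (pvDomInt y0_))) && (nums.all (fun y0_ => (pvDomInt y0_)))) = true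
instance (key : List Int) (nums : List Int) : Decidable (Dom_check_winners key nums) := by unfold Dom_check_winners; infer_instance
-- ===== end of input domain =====

-- ===== PORT A =====
-- header: B computes the match count once and returns the closed form 2^(count-1) (0 if no match); simpler than A's doubling accumulator.
def check_winners (key : List Int) (nums : List Int) : Int :=
  List.foldl (fun double num =>
    if num ∈ key then (if double = 0 then 1 else double * 2) else double) 0 nums

-- ===== PORT B =====
def check_winners_alt (key : List Int) (nums : List Int) : Int :=
  let count := (nums.countP (fun num => decide (num ∈ key)))
  if count ≠ 0 then (2 : Int) ^ (count - 1) else 0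

-- ===== PRECONDITION & SPEC =====
def Spec_check_winners (key : List Int) (nums : List Int) (out : Int) : Prop := out = check_winners_alt key nums
instance (key : List Int) (nums : List Int) (out : Int) : Decidable (Spec_check_winners key nums out) := by unfold Spec_check_winners; infer_instance

-- ===== CLAIM (what is proved, stated in full; the proofs are below) =====
def Claim_equal_check_winners : Prop := ∀ (key : List Int) (nums : List Int), Dom_check_winners key nums → Spec_check_winners key nums (check_winners key nums)

-- ===== LEMMAS AND PROOFS =====

-- ===== VERDICT (by name: the statement is the Claim_ definition above) =====
def pvPow2 (c : Nat) : Int := if c ≠ 0 then (2 : Int) ^ (c - 1) else 0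

lemma pvFold_inv (key : List Int) (nums : List Int) : ∀ c : Nat,
    List.foldl (fun double num =>
      if num ∈ key then (if double = 0 then 1 else double * 2) else double) (pvPow2 c) nums
    = pvPow2 (c + nums.countP (fun num => decide (num ∈ key))) := by
  induction nums with
  | nil => intro c; simp
  | cons n t ih =>
    intro c
    by_cases h : n ∈ key
    · have hstep : (if n ∈ key then (if pvPow2 c = 0 then 1 else pvPow2 c * 2) else pvPow2 c)
          = pvPow2 (c + 1) := by
        rcases Nat.eq_zero_or_pos c with hc | hc
        · subst hc; simp [pvPow2, h]
        · have hne : pvPow2 c ≠ 0 := by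
            unfold pvPow2; rw [if_pos hc.ne']; positivity
          rw [if_pos h, if_neg hne]
          unfold pvPow2
          rw [if_pos hc.ne', if_pos (Nat.succ_ne_zero c)]
          have hc1 : c - 1 + 1 = c := Nat.succ_pred_eq_of_pos hc
          rw [show c + 1 - 1 = c from rfl, ← hc1, pow_succ]
          simp
      rw [List.foldl_cons, hstep, ih (c + 1), List.countP_cons]
      simp only [h, decide_true, if_pos]
      congr 1
      omega
    · rw [List.foldl_cons, if_neg h, ih c, List.countP_cons]
      simp [h]

theorem check_winners_spec : Claim_equal_check_winners := by
  intro key nums _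
  unfold Spec_check_winners check_winners check_winners_alt
  have := pvFold_inv key nums 0
  simpa [pvPow2] using this
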